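-- pv_equiv track=rewrite | github.com/APodolskiy/programming_problems | stepik_course/number_of_bits.py | number_of_bits
-- ===== SOURCE A (Python) =====
-- from typing import List
--
-- def number_of_bits(arr: List):
--     def find_number_of_bits(num: int):
--         bits_num = 0
--         while num > 0:
--             if num & 1:
--                 bits_num += 1
--             num = num >> 1
--         return bits_num
--     return [find_number_of_bits(num) for num in arr]
-- ===== SOURCE B (Python) =====
-- def number_of_bits(arr):
--     def kernighan(num):
--         count = 0
--         while num > 0:
--             count += 1
--             num &= num - 1
--         return count
--     return [kernighan(num) for num in arr]
-- ===== Notes on version B (the rewrite author's own statement) =====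
-- stated objective: alternative
-- what changed: The per-number inner loop that scans every bit position (shift right by one, test the low bit) is replaced by Brian Kernighan's trick num &= num-1, which clears one set bit per iteration, so the loop runs once per set bit instead of once per bit position.
import Mathlib
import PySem

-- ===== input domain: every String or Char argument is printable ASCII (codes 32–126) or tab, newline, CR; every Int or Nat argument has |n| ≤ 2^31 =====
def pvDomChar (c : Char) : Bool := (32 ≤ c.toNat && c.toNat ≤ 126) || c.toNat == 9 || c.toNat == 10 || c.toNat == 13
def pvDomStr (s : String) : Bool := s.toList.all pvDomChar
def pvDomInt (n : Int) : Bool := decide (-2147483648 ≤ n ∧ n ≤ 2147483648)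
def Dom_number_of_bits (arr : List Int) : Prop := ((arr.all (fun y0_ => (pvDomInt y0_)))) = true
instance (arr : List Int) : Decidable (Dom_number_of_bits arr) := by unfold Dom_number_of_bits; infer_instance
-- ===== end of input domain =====

-- B replaces A's per-bit scan (shift right, test low bit) with Brian Kernighan's
-- num &= num-1 loop, one iteration per SET bit (objective: alternative algorithm, same asymptotics).

-- ===== PORT A =====
-- termination helper for A's while loop (cited by decreasing_by)
theorem pv_shift_toNat_lt (num : Int) (h : 0 < num) : (num >>> (1 : Nat)).toNat < num.toNat := by
  obtain ⟨n, rfl⟩ := Int.eq_ofNat_of_zero_le h.le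
  have hn : 0 < n := by exact_mod_cast h
  show ((n >>> 1 : Nat) : Int).toNat < _
  simp only [Int.toNat_natCast, Nat.shiftRight_succ, Nat.shiftRight_zero]
  exact Nat.div_lt_self hn one_lt_two

-- A's inner helper: while num > 0: if num & 1: bits_num += 1; num = num >> 1
def find_number_of_bits (num : Int) (bits_num : Int) : Int :=
  if h : num > 0 then
    find_number_of_bits (num >>> (1 : Nat))
      (if PySem.Int.band num 1 ≠ 0 then bits_num + 1 else bits_num)
  else bits_num
termination_by num.toNat
decreasing_by exact pv_shift_toNat_lt num h

def number_of_bits (arr : List Int) : List Int :=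
  arr.map (fun num => find_number_of_bits num 0)

-- ===== PORT B =====
-- termination helper for B's while loop (cited by decreasing_by)
theorem pv_band_pred_toNat_lt (num : Int) (h : 0 < num) :
    (PySem.Int.band num (num - 1)).toNat < num.toNat := by
  rw [PySem.Int.band_of_nonneg h.le (by omega)]
  have := Nat.and_le_right (n := num.toNat) (m := (num - 1).toNat)
  omega

-- B's inner helper: while num > 0: count += 1; num &= num - 1
def kernighan (num : Int) (count : Int) : Int :=
  if h : num > 0 then
    kernighan (PySem.Int.band num (num - 1)) (count + 1)
  else count
termination_by num.toNat
decreasing_by exact pv_band_pred_toNat_lt num h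

def number_of_bits_alt (arr : List Int) : List Int :=
  arr.map (fun num => kernighan num 0)

-- ===== PRECONDITION & SPEC =====
def Spec_number_of_bits (arr : List Int) (out : List Int) : Prop := out = number_of_bits_alt arr
instance (arr : List Int) (out : List Int) : Decidable (Spec_number_of_bits arr out) := by unfold Spec_number_of_bits; infer_instance

-- ===== CLAIM (what is proved, stated in full; the proofs are below) =====
def Claim_equal_number_of_bits : Prop := ∀ (arr : List Int), Dom_number_of_bits arr → Spec_number_of_bits arr (number_of_bits arr)

-- ===== LEMMAS AND PROOFS =====

-- bitCount of an even / odd natural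
theorem pv_bitCount_double (k : Nat) :
    PySem.Int.bitCount ((2 * k : Nat) : Int) = PySem.Int.bitCount (k : Int) := by
  rcases Nat.eq_zero_or_pos k with h | h
  · simp [h]
  · rw [PySem.Int.bitCount_natCast (by omega)]
    simp [Nat.mul_div_cancel_left _ (by norm_num : 0 < 2), Nat.mul_mod_right]

theorem pv_bitCount_double_add_one (k : Nat) :
    PySem.Int.bitCount ((2 * k + 1 : Nat) : Int) = 1 + PySem.Int.bitCount (k : Int) := by
  rw [PySem.Int.bitCount_natCast (by omega)]
  congr 1
  · omega
  · congr 1; omega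

-- clearing the lowest set bit: odd case
theorem pv_land_odd (m : Nat) : (2 * m + 1) &&& (2 * m) = 2 * m := by
  have := Nat.bitwise_bit (f := and) (by simp) true m false m
  simpa [Nat.bit, HAnd.hAnd, AndOp.and, Nat.land, Nat.mul_comm,
    show Nat.bitwise and m m = m from Nat.and_self m] using this

-- clearing the lowest set bit: even case
theorem pv_land_even (m : Nat) (h : 0 < m) : (2 * m) &&& (2 * m - 1) = 2 * (m &&& (m - 1)) := by
  have := Nat.bitwise_bit (f := and) (by simp) false m true (m - 1)
  have h2 : 2 * (m - 1) + 1 = 2 * m - 1 := by omega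
  rw [← h2]
  simpa [Nat.bit, HAnd.hAnd, AndOp.and, Nat.land, Nat.mul_comm] using this

-- num &= num-1 removes exactly one set bit
theorem pv_bitCount_land_pred (n : Nat) (h : 0 < n) :
    PySem.Int.bitCount ((n &&& (n - 1) : Nat) : Int) + 1 = PySem.Int.bitCount (n : Int) := by
  induction n using Nat.strong_induction_on with
  | _ n ih =>
    rcases Nat.even_or_odd n with ⟨m, hm⟩ | ⟨m, hm⟩
    · -- n = 2m, m > 0
      have hm2 : n = 2 * m := by omega
      have hmpos : 0 < m := by omega
      subst hm2
      rw [pv_land_even m hmpos, pv_bitCount_double, pv_bitCount_double]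
      exact ih m (by omega) hmpos
    · -- n = 2m + 1
      subst hm
      have : 2 * m + 1 - 1 = 2 * m := by omega
      rw [this, pv_land_odd, pv_bitCount_double, pv_bitCount_double_add_one]
      omega

-- A's loop computes acc + popcount
theorem pv_find_eq (n : Nat) : ∀ acc : Int,
    find_number_of_bits (n : Int) acc = acc + (PySem.Int.bitCount (n : Int) : Int) := by
  induction n using Nat.strong_induction_on with
  | _ n ih =>
    intro acc
    rcases Nat.eq_zero_or_pos n with h | h
    · subst h; rw [find_number_of_bits]; simp
    · rw [find_number_of_bits]
      have hpos : ((n : Int) > 0) := by exact_mod_cast h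
      rw [dif_pos hpos]
      have hs : ((n : Int) >>> (1 : Nat)) = ((n / 2 : Nat) : Int) := by
        show ((n >>> 1 : Nat) : Int) = _
        rw [Nat.shiftRight_succ, Nat.shiftRight_zero]
      have hb : PySem.Int.band (n : Int) 1 = ((n % 2 : Nat) : Int) := by
        have := PySem.Int.band_natCast n 1
        simpa [Nat.and_one_is_mod] using this
      rw [hs, ih (n / 2) (Nat.div_lt_self h one_lt_two), hb,
        PySem.Int.bitCount_natCast h]
      by_cases hodd : n % 2 = 0
      · simp [hodd]
      · have h1 : n % 2 = 1 := by omega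
        simp only [h1]
        push_cast
        ring

-- B's loop computes acc + popcount
theorem pv_kern_eq (n : Nat) : ∀ acc : Int,
    kernighan (n : Int) acc = acc + (PySem.Int.bitCount (n : Int) : Int) := by
  induction n using Nat.strong_induction_on with
  | _ n ih =>
    intro acc
    rcases Nat.eq_zero_or_pos n with h | h
    · subst h; rw [kernighan]; simp
    · rw [kernighan]
      have hpos : ((n : Int) > 0) := by exact_mod_cast h
      rw [dif_pos hpos]
      have hb : PySem.Int.band (n : Int) ((n : Int) - 1) = ((n &&& (n - 1) : Nat) : Int) := by
        have h1 : ((n : Int) - 1) = ((n - 1 : Nat) : Int) := by omega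
        rw [h1, PySem.Int.band_natCast]
      have hlt : n &&& (n - 1) < n := by
        have := Nat.and_le_right (n := n) (m := n - 1)
        omega
      rw [hb, ih _ hlt]
      have := pv_bitCount_land_pred n h
      omega

-- both loops agree on every Int (negatives and zero: both loops do not run)
theorem pv_elem_eq (num : Int) : find_number_of_bits num 0 = kernighan num 0 := by
  by_cases h : num ≤ 0
  · rw [find_number_of_bits, kernighan]
    rw [dif_neg (by omega), dif_neg (by omega)]
  · obtain ⟨n, rfl⟩ := Int.eq_ofNat_of_zero_le (by omega : (0:Int) ≤ num)
    rw [pv_find_eq, pv_kern_eq]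

-- ===== VERDICT (by name: the statement is the Claim_ definition above) =====
theorem number_of_bits_spec : Claim_equal_number_of_bits := by
  intro arr _
  unfold Spec_number_of_bits number_of_bits number_of_bits_alt
  exact List.map_congr_left (fun num _ => pv_elem_eq num)
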